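-- pv_equiv track=rewrite | github.com/pFindStudio/pDeepXL | pDeepXL/utils.py | SmoothLog
-- ===== SOURCE A (Python) =====
-- def SmoothLog(log_info):
--     min_idxs=[1,5]
--     max_idxs=[3,4,6,7]
--     smoothed=[]
--     for i, contents in enumerate(log_info):
--         if i==0:
--             smoothed.append(contents)
--         else:
--             for idx in min_idxs:
--                 contents[idx]=min(contents[idx],smoothed[-1][idx])
--             for idx in max_idxs:
--                 contents[idx]=max(contents[idx],smoothed[-1][idx])
--             smoothed.append(contents)
--     return smoothed
-- ===== SOURCE B (Python) =====
-- def SmoothLog(log_info):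
--     rows = list(log_info)
--     if len(rows) <= 1:
--         return rows
--     for idx in [1, 5]:
--         acc = rows[0][idx]
--         for row in rows[1:]:
--             acc = min(row[idx], acc)
--             row[idx] = acc
--     for idx in [3, 4, 6, 7]:
--         acc = rows[0][idx]
--         for row in rows[1:]:
--             acc = max(row[idx], acc)
--             row[idx] = acc
--     return rows
-- ===== Notes on version B (the rewrite author's own statement) =====
-- stated objective: alternative
-- what changed: Replaced A's single row-by-row pass that carries the previous smoothed row (reading 6 columns of it per row) with six independent column passes, each threading one scalar running min/max down its column.
import Mathlib
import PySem

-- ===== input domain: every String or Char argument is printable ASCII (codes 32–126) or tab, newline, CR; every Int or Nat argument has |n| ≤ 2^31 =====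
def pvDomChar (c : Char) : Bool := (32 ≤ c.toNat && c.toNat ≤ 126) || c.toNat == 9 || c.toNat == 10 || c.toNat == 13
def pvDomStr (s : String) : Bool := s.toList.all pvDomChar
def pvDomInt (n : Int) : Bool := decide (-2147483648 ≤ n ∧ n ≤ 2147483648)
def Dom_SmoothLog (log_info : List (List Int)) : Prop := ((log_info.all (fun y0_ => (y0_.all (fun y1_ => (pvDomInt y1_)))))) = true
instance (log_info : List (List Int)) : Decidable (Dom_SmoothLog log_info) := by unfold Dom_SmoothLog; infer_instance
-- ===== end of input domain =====

-- B replaces A's single row-by-row pass carrying the previous smoothed row with one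
-- running-min/max pass per column (objective: alternative decomposition, same O(n) cost).
-- Both A and B mutate the non-first row lists of the caller's input in place at indices
-- 1,3,4,5,6,7 (the same mutation); the equivalence proved here is about the return value.

-- ===== PORT A =====
-- indices here are the literal constants 1..7; Pre_ guarantees every row has length ≥ 8
-- (outside Pre_ the Python raises IndexError), so List.getD/List.set are exact on Pre_.
def pvStepA (smoothed : List (List Int)) (i : Int) (contents : List Int) : List (List Int) :=
  if i == 0 then smoothed ++ [contents]
  else
    let prev := PySem.List.pyGetD smoothed (-1) []   -- smoothed[-1]
    let c1 := [1, 5].foldl (fun (c : List Int) (idx : Nat) =>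
        c.set idx (min (c.getD idx 0) (prev.getD idx 0))) contents
    let c2 := [3, 4, 6, 7].foldl (fun (c : List Int) (idx : Nat) =>
        c.set idx (max (c.getD idx 0) (prev.getD idx 0))) c1
    smoothed ++ [c2]

def SmoothLog (log_info : List (List Int)) : List (List Int) :=
  (PySem.List.enumerate log_info).foldl (fun smoothed p => pvStepA smoothed p.1 p.2) []

-- ===== PORT B =====
-- one column pass: acc = rows[0][idx]; for row in rows[1:]: acc = op(row[idx], acc); row[idx] = acc
def pvColPass (op : Int → Int → Int) (idx : Nat) (rows : List (List Int)) : List (List Int) :=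
  match rows with
  | [] => []
  | r0 :: rest =>
    r0 :: (rest.foldl (fun (st : List (List Int) × Int) row =>
        let acc := op (row.getD idx 0) st.2
        (st.1 ++ [row.set idx acc], acc)) (([] : List (List Int)), r0.getD idx 0)).1

def SmoothLog_alt (log_info : List (List Int)) : List (List Int) :=
  if log_info.length ≤ 1 then log_info
  else
    let rows1 := [1, 5].foldl (fun rs idx => pvColPass min idx rs) log_info
    [3, 4, 6, 7].foldl (fun rs idx => pvColPass max idx rs) rows1

-- ===== PRECONDITION & SPEC =====
-- Pre_ excludes exactly the inputs where A raises IndexError: two or more rows and some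
-- row shorter than 8 (Python indexes every row at indices up to 7 once there are ≥ 2 rows).
def Pre_SmoothLog (log_info : List (List Int)) : Prop :=
  log_info.length ≤ 1 ∨ ∀ r ∈ log_info, 8 ≤ r.length
instance (log_info : List (List Int)) : Decidable (Pre_SmoothLog log_info) := by
  unfold Pre_SmoothLog; infer_instance
def pvWitness_SmoothLog : List (List Int) :=
  [[0, 9, 2, 3, 4, 5, 6, 7], [7, 6, 5, 4, 3, 2, 1, 0]]

def Spec_SmoothLog (log_info : List (List Int)) (out : List (List Int)) : Prop := out = SmoothLog_alt log_info
instance (log_info : List (List Int)) (out : List (List Int)) : Decidable (Spec_SmoothLog log_info out) := by unfold Spec_SmoothLog; infer_instance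

-- ===== CLAIM (what is proved, stated in full; the proofs are below) =====
def Claim_equal_SmoothLog : Prop := ∀ (log_info : List (List Int)), Dom_SmoothLog log_info → Pre_SmoothLog log_info → Spec_SmoothLog log_info (SmoothLog log_info)

-- ===== LEMMAS AND PROOFS =====

-- one smoothing step at a single column: new row = r with column idx set to op(r[idx], p[idx])
def pvPass1 (op : Int → Int → Int) (idx : Nat) (p r : List Int) : List Int :=
  r.set idx (op (r.getD idx 0) (p.getD idx 0))

-- several single-column steps applied to the same row, all reading the same previous row p
def pvCombi (ps : List ((Int → Int → Int) × Nat)) (p r : List Int) : List Int :=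
  ps.foldl (fun c oi => pvPass1 oi.1 oi.2 p c) r

-- scan: each row transformed by f with the previous TRANSFORMED row
def pvScan (f : List Int → List Int → List Int) : List Int → List (List Int) → List (List Int)
  | _, [] => []
  | p, r :: rs => f p r :: pvScan f (f p r) rs

def pvSix : List ((Int → Int → Int) × Nat) :=
  [(min, 1), (min, 5), (max, 3), (max, 4), (max, 6), (max, 7)]

theorem pvCombi_snoc (ps : List ((Int → Int → Int) × Nat)) (oi : (Int → Int → Int) × Nat)
    (p r : List Int) :
    pvCombi (ps ++ [oi]) p r = pvPass1 oi.1 oi.2 p (pvCombi ps p r) := by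
  unfold pvCombi
  rw [List.foldl_append]
  rfl

theorem pvCombi_congr (ps : List ((Int → Int → Int) × Nat)) (p c r : List Int)
    (h : ∀ j ∈ ps.map Prod.snd, c.getD j 0 = p.getD j 0) :
    pvCombi ps p r = pvCombi ps c r := by
  induction ps generalizing r with
  | nil => rfl
  | cons oi ps ih =>
    simp only [pvCombi, List.foldl_cons] at *
    rw [show pvPass1 oi.1 oi.2 p r = pvPass1 oi.1 oi.2 c r by
          unfold pvPass1; rw [h oi.2 (by simp)]]
    exact ih _ (fun j hj => h j (by simp [hj]))

theorem pvPass1_getD_ne (op : Int → Int → Int) (idx j : Nat) (p r : List Int) (h : j ≠ idx) :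
    (pvPass1 op idx p r).getD j 0 = r.getD j 0 := by
  unfold pvPass1
  simp [List.getD, List.getElem?_set_ne (Ne.symm h)]

-- merging one more column pass into a scan of already-merged passes
theorem pvMerge (op : Int → Int → Int) (idx : Nat) (ps : List ((Int → Int → Int) × Nat))
    (hidx : idx ∉ ps.map Prod.snd) :
    ∀ (rs : List (List Int)) (p q c : List Int),
      (∀ j ∈ ps.map Prod.snd, c.getD j 0 = p.getD j 0) →
      c.getD idx 0 = q.getD idx 0 →
      pvScan (pvPass1 op idx) q (pvScan (pvCombi ps) p rs)
        = pvScan (pvCombi (ps ++ [(op, idx)])) c rs := by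
  intro rs
  induction rs with
  | nil => intro p q c _ _; rfl
  | cons r rs ih =>
    intro p q c hI hJ
    have hfc : pvCombi ps c r = pvCombi ps p r := (pvCombi_congr ps p c r hI).symm
    have hhead : pvCombi (ps ++ [(op, idx)]) c r = pvPass1 op idx q (pvCombi ps p r) := by
      rw [pvCombi_snoc, hfc]
      unfold pvPass1
      rw [hJ]
    simp only [pvScan]
    rw [hhead]
    congr 1
    exact ih (pvCombi ps p r) (pvPass1 op idx q (pvCombi ps p r))
      (pvPass1 op idx q (pvCombi ps p r))
      (fun j hj => pvPass1_getD_ne op idx j _ _ (fun e => hidx (e ▸ hj)))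
      rfl

-- lengths: pvCombi preserves row length; rows of a pvCombi-scan keep their length
theorem pvCombi_length (ps : List ((Int → Int → Int) × Nat)) (p r : List Int) :
    (pvCombi ps p r).length = r.length := by
  induction ps generalizing r with
  | nil => rfl
  | cons oi ps ih =>
    simp only [pvCombi, List.foldl_cons] at *
    rw [ih]; simp [pvPass1]

theorem pvScan_length (ps : List ((Int → Int → Int) × Nat)) (t : List (List Int)) (p : List Int)
    (h : ∀ r ∈ t, 8 ≤ r.length) :
    ∀ r' ∈ pvScan (pvCombi ps) p t, 8 ≤ r'.length := by
  induction t generalizing p with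
  | nil => intro r' hr'; simp [pvScan] at hr'
  | cons r rs ih =>
    intro r' hr'
    simp only [pvScan, List.mem_cons] at hr'
    rcases hr' with h1 | h2
    · rw [h1, pvCombi_length]; exact h r (by simp)
    · exact ih _ (fun x hx => h x (by simp [hx])) r' h2

-- B's inner loop equals a single-column scan (rows long enough so the written cell is read back)
theorem pvColLoop (op : Int → Int → Int) (idx : Nat) (hidx : idx < 8) :
    ∀ (t : List (List Int)) (out : List (List Int)) (p : List Int),
      (∀ r ∈ t, 8 ≤ r.length) →
      (t.foldl (fun (st : List (List Int) × Int) row =>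
          let acc := op (row.getD idx 0) st.2
          (st.1 ++ [row.set idx acc], acc)) (out, p.getD idx 0)).1
        = out ++ pvScan (pvPass1 op idx) p t := by
  intro t
  induction t with
  | nil => intro out p _; simp [pvScan]
  | cons r rs ih =>
    intro out p hlen
    simp only [List.foldl_cons, pvScan]
    have hr : 8 ≤ r.length := hlen r (by simp)
    have hget : (pvPass1 op idx p r).getD idx 0 = op (r.getD idx 0) (p.getD idx 0) := by
      unfold pvPass1
      simp [List.getD, List.getElem?_set_self (by omega : idx < r.length)]
    have := ih (out ++ [r.set idx (op (r.getD idx 0) (p.getD idx 0))])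
      (pvPass1 op idx p r) (fun x hx => hlen x (by simp [hx]))
    rw [hget] at this
    simpa [pvPass1, List.append_assoc] using this

theorem pvColPass_eq (op : Int → Int → Int) (idx : Nat) (hidx : idx < 8)
    (h0 : List Int) (t : List (List Int)) (hlen : ∀ r ∈ t, 8 ≤ r.length) :
    pvColPass op idx (h0 :: t) = h0 :: pvScan (pvPass1 op idx) h0 t := by
  simp only [pvColPass]
  rw [pvColLoop op idx hidx t [] h0 hlen]
  simp

-- A's step on a non-first row is pvCombi pvSix applied with the previous smoothed row
theorem pvStepA_eq (s : List (List Int)) (i : Int) (hi : i ≠ 0) (c : List Int) :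
    pvStepA s i c = s ++ [pvCombi pvSix (PySem.List.pyGetD s (-1) []) c] := by
  unfold pvStepA
  rw [if_neg (by simpa using hi)]
  simp [pvCombi, pvSix, pvPass1, List.foldl_cons]

-- A's enumerate-fold, from index k ≥ 1 onward, is the pvSix scan appended to the accumulator
theorem pvFoldA (t : List (List Int)) :
    ∀ (k : Int) (_ : 1 ≤ k) (s : List (List Int)) (last : List Int),
      PySem.List.pyGetD s (-1) [] = last →
      (PySem.List.enumerate t k).foldl (fun smoothed p => pvStepA smoothed p.1 p.2) s
        = s ++ pvScan (pvCombi pvSix) last t := by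
  induction t with
  | nil => intro k _ s last _; simp [PySem.List.enumerate, pvScan]
  | cons r rs ih =>
    intro k hk s last hlast
    rw [PySem.List.enumerate_cons, List.foldl_cons]
    have hstep : pvStepA s k r = s ++ [pvCombi pvSix last r] := by
      rw [pvStepA_eq s k (by omega) r, hlast]
    rw [hstep]
    rw [ih (k + 1) (by omega) _ (pvCombi pvSix last r) (PySem.List.pyGetD_neg_one_append_singleton s _ _)]
    simp [pvScan, List.append_assoc]

theorem SmoothLog_eq_scan (h0 : List Int) (t : List (List Int)) :
    SmoothLog (h0 :: t) = h0 :: pvScan (pvCombi pvSix) h0 t := by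
  unfold SmoothLog
  rw [PySem.List.enumerate_cons, List.foldl_cons]
  have h1 : pvStepA [] 0 h0 = [h0] := by simp [pvStepA]
  rw [h1, pvFoldA t (0 + 1) (by omega) [h0] h0 (by rfl)]
  rfl

-- pushing B's passes one at a time into a single pvCombi scan
theorem pvChain (h0 : List Int) (t : List (List Int)) (hlen : ∀ r ∈ t, 8 ≤ r.length)
    (op : Int → Int → Int) (idx : Nat) (hidx : idx < 8)
    (ps : List ((Int → Int → Int) × Nat)) (hnotin : idx ∉ ps.map Prod.snd) :
    pvColPass op idx (h0 :: pvScan (pvCombi ps) h0 t)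
      = h0 :: pvScan (pvCombi (ps ++ [(op, idx)])) h0 t := by
  rw [pvColPass_eq op idx hidx h0 _ (pvScan_length ps t h0 hlen)]
  rw [pvMerge op idx ps hnotin t h0 h0 h0 (fun _ _ => rfl) rfl]

theorem SmoothLog_alt_eq_scan (h0 : List Int) (r1 : List Int) (t : List (List Int))
    (hlen : ∀ r ∈ (r1 :: t), 8 ≤ r.length) :
    SmoothLog_alt (h0 :: r1 :: t) = h0 :: pvScan (pvCombi pvSix) h0 (r1 :: t) := by
  unfold SmoothLog_alt
  rw [if_neg (by simp)]
  simp only [List.foldl_cons, List.foldl_nil]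
  have e0 : (h0 :: r1 :: t) = h0 :: pvScan (pvCombi []) h0 (r1 :: t) := by
    have : ∀ (u : List (List Int)) (p : List Int), pvScan (pvCombi []) p u = u := by
      intro u; induction u with
      | nil => intro p; rfl
      | cons x xs ih => intro p; simp [pvScan, pvCombi, ih]
    rw [this]
  rw [e0]
  rw [pvChain h0 _ hlen min 1 (by omega) [] (by simp)]
  simp only [List.nil_append]
  rw [pvChain h0 _ hlen min 5 (by omega) [(min, 1)] (by simp)]
  simp only [List.nil_append, List.cons_append]
  rw [pvChain h0 _ hlen max 3 (by omega) [(min, 1), (min, 5)] (by simp)]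
  simp only [List.nil_append, List.cons_append]
  rw [pvChain h0 _ hlen max 4 (by omega) [(min, 1), (min, 5), (max, 3)] (by simp)]
  simp only [List.nil_append, List.cons_append]
  rw [pvChain h0 _ hlen max 6 (by omega) [(min, 1), (min, 5), (max, 3), (max, 4)] (by simp)]
  simp only [List.nil_append, List.cons_append]
  rw [pvChain h0 _ hlen max 7 (by omega) [(min, 1), (min, 5), (max, 3), (max, 4), (max, 6)] (by simp)]
  rfl

-- ===== VERDICT (by name: the statement is the Claim_ definition above) =====
theorem SmoothLog_spec : Claim_equal_SmoothLog := by
  intro log_info _ hpre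
  unfold Spec_SmoothLog
  match log_info with
  | [] => rfl
  | [h0] => rfl
  | h0 :: r1 :: t =>
    have hlen : ∀ r ∈ (r1 :: t), 8 ≤ r.length := by
      rcases hpre with h | h
      · simp at h
      · intro r hr; exact h r (List.mem_cons_of_mem _ hr)
    rw [SmoothLog_eq_scan, SmoothLog_alt_eq_scan h0 r1 t hlen]
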